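-- pv_equiv track=rewrite | github.com/pypi-data/pypi-mirror-396 | packages/npxpy/npxpy-0.4.0-py3-none-any.whl/npxpy/gds.py | _meander_order
-- ===== SOURCE A (Python) =====
-- def _meander_order(tile_keys):
--     """
--     Given an iterable of (ix, iy) tile indices,
--     return a list of (ix, iy) in a zigzag (meander) order.
--
--     - Sort by ascending y for the rows.
--     - For each consecutive row, alternate the x-direction:
--         * row0: left-to-right
--         * row1: right-to-left
--         * row2: left-to-right
--         * ...
--     """
--     # Group the tile indices by their y
--     from collections import defaultdict
--
--     rows = defaultdict(list)
--     for ix, iy in tile_keys: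
--         rows[iy].append(ix)
--
--     # Sort the rows by Y ascending
--     sorted_ys = sorted(rows.keys())
--
--     # Build the final list of (ix, iy)
--     meandered = []
--     for row_i, y in enumerate(sorted_ys):
--         x_list = sorted(rows[y])
--         # If row_i is odd, reverse the list to create the zigzag
--         if row_i % 2 == 1:
--             x_list.reverse()
--
--         for x in x_list:
--             meandered.append((x, y))
--
--     return meandered
-- ===== SOURCE B (Python) =====
-- def _meander_order(tile_keys):
--     """Zigzag order: sort once by (iy, ix), then group consecutive rows and
--     reverse every other group."""
--     from itertools import groupby
--
--     ordered = sorted(tile_keys, key=lambda t: (t[1], t[0]))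
--     meandered = []
--     reverse = False
--     for _, group in groupby(ordered, key=lambda t: t[1]):
--         run = list(group)
--         meandered.extend(reversed(run) if reverse else run)
--         reverse = not reverse
--     return meandered
-- ===== Notes on version B (the rewrite author's own statement) =====
-- stated objective: idiomatic
-- what changed: Replaced the defaultdict row-grouping plus per-row sort by one sort of the whole list on (iy, ix) followed by itertools.groupby over consecutive equal-iy runs with a boolean flag toggling the direction of every other run.
import Mathlib
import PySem

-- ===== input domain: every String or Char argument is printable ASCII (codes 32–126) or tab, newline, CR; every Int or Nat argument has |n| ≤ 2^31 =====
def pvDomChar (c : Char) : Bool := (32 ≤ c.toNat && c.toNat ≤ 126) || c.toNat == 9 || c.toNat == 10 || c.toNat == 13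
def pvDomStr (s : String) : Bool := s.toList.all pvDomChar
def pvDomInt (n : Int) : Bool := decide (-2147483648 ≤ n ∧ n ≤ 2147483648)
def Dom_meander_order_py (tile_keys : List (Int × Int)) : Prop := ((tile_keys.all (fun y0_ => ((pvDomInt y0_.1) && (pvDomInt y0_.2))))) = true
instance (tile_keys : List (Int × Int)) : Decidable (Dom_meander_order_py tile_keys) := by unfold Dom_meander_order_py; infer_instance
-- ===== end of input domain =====

-- B replaces A's defaultdict row-grouping + per-row sort by one sort on (iy, ix) followed by a
-- groupby over consecutive equal-iy runs with a toggling direction flag (idiomatic; same cost).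


-- ===== PORT A =====
-- literal port of A: group x's by y in an insertion-ordered dict, sort the keys,
-- then for each (row_i, y) sort the row, reverse it when row_i is odd, and append (x, y).
def meander_order_py (tile_keys : List (Int × Int)) : List (Int × Int) :=
  let rows := tile_keys.foldl (fun d p => d.modify p.2 ([] : List Int) (fun xs => xs ++ [p.1])) PySem.Dict.empty
  let sorted_ys := PySem.List.sorted rows.keys (fun y => y) false
  (PySem.List.enumerate sorted_ys).foldl (fun meandered iy =>
    let x_list := PySem.List.sorted (rows.getD iy.2 []) (fun x => x) false
    let x_list := if PySem.Int.mod iy.1 2 == 1 then x_list.reverse else x_list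
    x_list.foldl (fun acc x => acc ++ [(x, iy.2)]) meandered) []

-- ===== PORT B =====
-- itertools.groupby keyed on the second component (consecutive equal-iy runs)
def pyGroupby : List (Int × Int) → List (List (Int × Int))
  | [] => []
  | p :: rest =>
    (p :: rest.takeWhile (fun q => q.2 == p.2)) :: pyGroupby (rest.dropWhile (fun q => q.2 == p.2))
termination_by l => l.length
decreasing_by
  simp only [List.length_cons]
  exact Nat.lt_succ_of_le (List.length_dropWhile_le _ _)

-- literal port of B: sort once by the tuple key (t[1], t[0]), then fold over the groupby runs
-- with the (meandered, reverse) state, reversing a run when the flag is set.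
def meander_order_py_alt (tile_keys : List (Int × Int)) : List (Int × Int) :=
  let ordered := PySem.List.sorted2 tile_keys (fun t => t.2) (fun t => t.1) false
  ((pyGroupby ordered).foldl
    (fun (s : List (Int × Int) × Bool) run =>
      (s.1 ++ (if s.2 then run.reverse else run), !s.2)) ([], false)).1

-- ===== PRECONDITION & SPEC =====
def Spec_meander_order_py (tile_keys : List (Int × Int)) (out : List (Int × Int)) : Prop := out = meander_order_py_alt tile_keys
instance (tile_keys : List (Int × Int)) (out : List (Int × Int)) : Decidable (Spec_meander_order_py tile_keys out) := by unfold Spec_meander_order_py; infer_instance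

-- ===== CLAIM (what is proved, stated in full; the proofs are below) =====
def Claim_equal_meander_order_py : Prop := ∀ (tile_keys : List (Int × Int)), Dom_meander_order_py tile_keys → Spec_meander_order_py tile_keys (meander_order_py tile_keys)

-- ===== LEMMAS AND PROOFS =====

-- lexicographic ≤ on (x, y) pairs ordered by (y, x)
def lexR (a b : Int × Int) : Prop := a.2 < b.2 ∨ (a.2 = b.2 ∧ a.1 ≤ b.1)

-- the distinct y's, ascending
def ysOf (tile_keys : List (Int × Int)) : List Int :=
  PySem.List.sorted (PySem.Set.ofList (tile_keys.map (fun p => p.2))) (fun y => y) false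

-- the sorted x's of row y
def rowOf (tile_keys : List (Int × Int)) (y : Int) : List Int :=
  PySem.List.sorted ((tile_keys.filter (fun p => p.2 == y)).map (fun p => p.1)) (fun x => x) false

def blockOf (tile_keys : List (Int × Int)) (y : Int) : List (Int × Int) :=
  (rowOf tile_keys y).map (fun x => (x, y))

def blocksOf (tile_keys : List (Int × Int)) : List (List (Int × Int)) :=
  (ysOf tile_keys).map (blockOf tile_keys)

-- the common zigzag normal form both ports reduce to
def zigzag : Bool → List (List (Int × Int)) → List (Int × Int)
  | _, [] => []
  | b, g :: gs => (if b then g.reverse else g) ++ zigzag (!b) gs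

-- ---- generic facts about lexR ----
theorem lexR_trans {a b c : Int × Int} (h1 : lexR a b) (h2 : lexR b c) : lexR a c := by
  unfold lexR at *; rcases h1 with h1 | ⟨h1, h1'⟩ <;> rcases h2 with h2 | ⟨h2, h2'⟩ <;> omega

theorem lexR_antisymm {a b : Int × Int} (h1 : lexR a b) (h2 : lexR b a) : a = b := by
  unfold lexR at *
  rcases a with ⟨ax, ay⟩; rcases b with ⟨bx, by'⟩
  simp only [Prod.mk.injEq]
  rcases h1 with h1 | ⟨h1, h1'⟩ <;> rcases h2 with h2 | ⟨h2, h2'⟩ <;> omega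

-- the comparison sorted2 uses for keys ((·.2), (·.1))
def lexBef (a b : Int × Int) : Bool :=
  decide (a.2 < b.2) || (!decide (b.2 < a.2) && decide (a.1 < b.1))

theorem lexR_of_lexBef {a b : Int × Int} (h : lexBef a b = true) : lexR a b := by
  unfold lexBef at h; unfold lexR
  simp only [Bool.or_eq_true, Bool.and_eq_true, Bool.not_eq_eq_eq_not, Bool.not_true,
    decide_eq_true_eq, decide_eq_false_iff_not] at h
  omega

theorem lexR_of_not_lexBef {a b : Int × Int} (h : lexBef a b = false) : lexR b a := by
  unfold lexBef at h; unfold lexR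
  simp only [Bool.or_eq_false_iff, Bool.and_eq_false_iff, Bool.not_eq_eq_eq_not, Bool.not_false,
    decide_eq_false_iff_not, decide_eq_true_eq] at h
  omega

theorem insertBy_lexBef_pairwise (x : Int × Int) (acc : List (Int × Int))
    (h : acc.Pairwise lexR) : (PySem.List.insertBy lexBef x acc).Pairwise lexR := by
  induction acc with
  | nil => simp [PySem.List.insertBy]
  | cons y ys ih =>
    rcases h with _ | ⟨hy, hys⟩
    by_cases hb : lexBef x y = true
    · have hxy : lexR x y := lexR_of_lexBef hb
      simp only [PySem.List.insertBy, hb, if_pos]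
      exact List.Pairwise.cons
        (by intro z hz
            rcases List.mem_cons.mp hz with rfl | hz
            · exact hxy
            · exact lexR_trans hxy (hy z hz))
        (List.Pairwise.cons hy hys)
    · rw [Bool.not_eq_true] at hb
      simp only [PySem.List.insertBy, hb]
      simp only [Bool.false_eq_true, if_false]
      exact List.Pairwise.cons
        (by intro z hz
            rcases (PySem.List.mem_insertBy lexBef x z ys).mp hz with rfl | hz
            · exact lexR_of_not_lexBef hb
            · exact hy z hz)
        (ih hys)

theorem sorted2_pairwise_lexR (tile_keys : List (Int × Int)) :
    (PySem.List.sorted2 tile_keys (fun t => t.2) (fun t => t.1) false).Pairwise lexR := by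
  have key : ∀ (l : List (Int × Int)) (acc : List (Int × Int)), acc.Pairwise lexR →
      (List.foldl (fun acc x => PySem.List.insertBy lexBef x acc) acc l).Pairwise lexR := by
    intro l
    induction l with
    | nil => intro acc h; exact h
    | cons p t ih => intro acc h; exact ih _ (insertBy_lexBef_pairwise p acc h)
  have hdef : PySem.List.sorted2 tile_keys (fun t => t.2) (fun t => t.1) false
      = List.foldl (fun acc x => PySem.List.insertBy lexBef x acc) [] tile_keys := rfl
  rw [hdef]
  exact key tile_keys [] List.Pairwise.nil

-- ---- the partition permutation ----
theorem flatMap_filter_head (p : Int × Int) (t : List (Int × Int)) :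
    ∀ (ys : List Int), ys.Nodup → p.2 ∈ ys →
    (ys.flatMap (fun y => (p :: t).filter (fun q => q.2 == y))).Perm
      (p :: ys.flatMap (fun y => t.filter (fun q => q.2 == y))) := by
  intro ys
  induction ys with
  | nil => intro _ h; cases h
  | cons y ys ih =>
    intro hnd hmem
    rcases List.nodup_cons.mp hnd with ⟨hy, hnd'⟩
    simp only [List.flatMap_cons]
    by_cases hpy : p.2 = y
    · rw [List.filter_cons_of_pos (by simpa using hpy)]
      have hrest : ys.flatMap (fun y' => (p :: t).filter (fun q => q.2 == y'))
          = ys.flatMap (fun y' => t.filter (fun q => q.2 == y')) := by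
        apply List.flatMap_congr
        intro y' hy'
        have hne : ¬ p.2 = y' := by
          intro hc
          have : y = y' := by omega
          exact hy (this ▸ hy')
        rw [List.filter_cons_of_neg (by simpa using hne)]
      rw [hrest]
      simp
    · rw [List.filter_cons_of_neg (by simpa using hpy)]
      have hmem' : p.2 ∈ ys := by
        rcases List.mem_cons.mp hmem with h | h
        · exact absurd h hpy
        · exact h
      refine (List.Perm.append_left _ (ih hnd' hmem')).trans ?_
      exact List.perm_middle

theorem flatMap_filter_perm (ys : List Int) (hnd : ys.Nodup) :
    ∀ (tk : List (Int × Int)), (∀ p ∈ tk, p.2 ∈ ys) →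
    (ys.flatMap (fun y => tk.filter (fun p => p.2 == y))).Perm tk := by
  intro tk
  induction tk with
  | nil => intro _; simp
  | cons p t ih =>
    intro hcov
    refine (flatMap_filter_head p t ys hnd (hcov p List.mem_cons_self)).trans ?_
    exact List.Perm.cons p (ih (fun q hq => hcov q (List.mem_cons_of_mem p hq)))

theorem blockOf_perm (tk : List (Int × Int)) (y : Int) :
    (blockOf tk y).Perm (tk.filter (fun p => p.2 == y)) := by
  unfold blockOf rowOf
  have h1 : (PySem.List.sorted ((tk.filter (fun p => p.2 == y)).map (fun p => p.1))
      (fun x => x) false).Perm ((tk.filter (fun p => p.2 == y)).map (fun p => p.1)) :=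
    PySem.List.sorted_perm _ _ _
  refine (h1.map (fun x => (x, y))).trans ?_
  rw [List.map_map]
  refine List.Perm.of_eq ?_
  have hcg : ∀ p ∈ tk.filter (fun p => p.2 == y),
      ((fun x => (x, y)) ∘ (fun p : Int × Int => p.1)) p = id p := by
    intro p hp
    have h2 : p.2 = y := by simpa using (List.mem_filter.mp hp).2
    simp [Function.comp, ← h2]
  rw [List.map_congr_left hcg, List.map_id]

theorem blocksOf_flatten_perm (tk : List (Int × Int)) :
    (blocksOf tk).flatten.Perm tk := by
  have hstep : ∀ (ys : List Int),
      ((ys.map (blockOf tk)).flatten).Perm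
        (ys.flatMap (fun y => tk.filter (fun p => p.2 == y))) := by
    intro ys
    induction ys with
    | nil => simp
    | cons y ys ih =>
      simp only [List.map_cons, List.flatten_cons, List.flatMap_cons]
      exact List.Perm.append (blockOf_perm tk y) ih
  have hnd : (ysOf tk).Nodup := by
    unfold ysOf
    exact (PySem.List.sorted_perm (PySem.Set.ofList (tk.map (fun p => p.2)))
      (fun y => y) false).symm.nodup (PySem.Set.nodup_ofList _)
  have hcov : ∀ p ∈ tk, p.2 ∈ ysOf tk := by
    intro p hp
    unfold ysOf
    rw [PySem.List.mem_sorted, PySem.Set.mem_ofList]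
    exact List.mem_map_of_mem hp
  exact (hstep (ysOf tk)).trans (flatMap_filter_perm (ysOf tk) hnd tk hcov)

theorem mem_blockOf {tk : List (Int × Int)} {y : Int} {p : Int × Int}
    (h : p ∈ blockOf tk y) : p.2 = y := by
  unfold blockOf at h
  rcases List.mem_map.mp h with ⟨x, _, rfl⟩
  rfl

theorem blocksOf_flatten_pairwise (tk : List (Int × Int)) :
    (blocksOf tk).flatten.Pairwise lexR := by
  rw [List.pairwise_flatten]
  constructor
  · intro b hb
    rcases List.mem_map.mp hb with ⟨y, _, rfl⟩
    unfold blockOf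
    rw [List.pairwise_map]
    refine (PySem.List.sorted_pairwise _ (fun x => x)).imp ?_
    intro a b hab
    exact Or.inr ⟨rfl, hab⟩
  · unfold blocksOf
    rw [List.pairwise_map]
    refine (PySem.List.sorted_ofList_pairwise_lt (tk.map (fun p => p.2))).imp ?_
    intro y y' hlt p hp q hq
    exact Or.inl (by rw [mem_blockOf hp, mem_blockOf hq]; exact hlt)

theorem sorted2_eq_blocksOf_flatten (tk : List (Int × Int)) :
    PySem.List.sorted2 tk (fun t => t.2) (fun t => t.1) false = (blocksOf tk).flatten := by
  refine List.Perm.eq_of_pairwise (fun a b _ _ h1 h2 => lexR_antisymm h1 h2)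
    (sorted2_pairwise_lexR tk) (blocksOf_flatten_pairwise tk) ?_
  exact (PySem.List.sorted2_perm tk _ _ false).trans (blocksOf_flatten_perm tk).symm

-- ---- groupby recovers the blocks ----
theorem pyGroupby_flatten (bs : List (List (Int × Int)))
    (hne : ∀ b ∈ bs, b ≠ [])
    (hconst : ∀ b ∈ bs, ∀ p ∈ b, ∀ q ∈ b, p.2 = q.2)
    (hsep : bs.Pairwise (fun b c => ∀ p ∈ b, ∀ q ∈ c, p.2 ≠ q.2)) :
    pyGroupby bs.flatten = bs := by
  induction bs with
  | nil => simp [pyGroupby]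
  | cons b bs ih =>
    rcases hsep with _ | ⟨hsepb, hsep'⟩
    obtain ⟨p, rest, rfl⟩ : ∃ p rest, b = p :: rest := by
      cases b with
      | nil => exact absurd rfl (hne [] List.mem_cons_self)
      | cons p rest => exact ⟨p, rest, rfl⟩
    have hrest : ∀ q ∈ rest, (q.2 == p.2) = true := by
      intro q hq
      have := hconst _ List.mem_cons_self q (List.mem_cons_of_mem p hq) p List.mem_cons_self
      simpa using this
    have hother : ∀ q ∈ bs.flatten, (q.2 == p.2) = false := by
      intro q hq
      rcases List.mem_flatten.mp hq with ⟨c, hc, hqc⟩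
      have := hsepb c hc p List.mem_cons_self q hqc
      simpa using Ne.symm this
    have htake : List.takeWhile (fun q => q.2 == p.2) (rest ++ bs.flatten) = rest := by
      rw [List.takeWhile_append]
      rw [List.takeWhile_eq_self_iff.mpr hrest]
      rw [if_pos rfl]
      cases hfl : bs.flatten with
      | nil => simp
      | cons q t =>
        rw [List.takeWhile_cons_of_neg]
        · simp
        · have := hother q (by rw [hfl]; exact List.mem_cons_self)
          simp [this]
    have hdrop : List.dropWhile (fun q => q.2 == p.2) (rest ++ bs.flatten) = bs.flatten := by
      rw [List.dropWhile_append]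
      rw [List.dropWhile_eq_nil_iff.mpr (fun x hx => hrest x hx)]
      simp only [List.isEmpty_nil, if_true]
      cases hfl : bs.flatten with
      | nil => rfl
      | cons q t =>
        rw [List.dropWhile_cons_of_neg]
        have := hother q (by rw [hfl]; exact List.mem_cons_self)
        simp [this]
    show pyGroupby (p :: (rest ++ bs.flatten)) = _
    rw [pyGroupby, htake, hdrop]
    rw [ih (fun c hc => hne c (List.mem_cons_of_mem _ hc))
        (fun c hc => hconst c (List.mem_cons_of_mem _ hc)) hsep']

theorem pyGroupby_blocksOf (tk : List (Int × Int)) :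
    pyGroupby (blocksOf tk).flatten = blocksOf tk := by
  apply pyGroupby_flatten
  · intro b hb
    rcases List.mem_map.mp hb with ⟨y, hy, rfl⟩
    have hymem : y ∈ tk.map (fun p => p.2) := by
      have := (PySem.List.mem_sorted _ _ _ y).mp hy
      rwa [PySem.Set.mem_ofList] at this
    rcases List.mem_map.mp hymem with ⟨p, hp, rfl⟩
    unfold blockOf rowOf
    intro hcontra
    rcases List.map_eq_nil_iff.mp hcontra with hnil
    rw [PySem.List.sorted_eq_nil_iff] at hnil
    rcases List.map_eq_nil_iff.mp hnil with hnil'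
    have : p ∈ tk.filter (fun q => q.2 == p.2) := List.mem_filter.mpr ⟨hp, by simp⟩
    rw [hnil'] at this
    cases this
  · intro b hb q hq r hr
    rcases List.mem_map.mp hb with ⟨y, _, rfl⟩
    rw [mem_blockOf hq, mem_blockOf hr]
  · unfold blocksOf
    rw [List.pairwise_map]
    refine (PySem.List.sorted_ofList_pairwise_lt (tk.map (fun p => p.2))).imp ?_
    intro y y' hlt q hq r hr
    rw [mem_blockOf hq, mem_blockOf hr]
    omega

-- ---- B collapses to zigzag ----
theorem foldl_pair_zigzag (gs : List (List (Int × Int))) :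
    ∀ (acc : List (Int × Int)) (b : Bool),
    (gs.foldl (fun (s : List (Int × Int) × Bool) run =>
      (s.1 ++ (if s.2 then run.reverse else run), !s.2)) (acc, b)).1 = acc ++ zigzag b gs := by
  induction gs with
  | nil => intro acc b; simp [zigzag]
  | cons g gs ih =>
    intro acc b
    simp only [List.foldl_cons, zigzag, ih, List.append_assoc]

theorem alt_eq_zigzag (tk : List (Int × Int)) :
    meander_order_py_alt tk = zigzag false (blocksOf tk) := by
  simp only [meander_order_py_alt]
  rw [sorted2_eq_blocksOf_flatten, pyGroupby_blocksOf, foldl_pair_zigzag, List.nil_append]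

-- ---- A collapses to zigzag ----
theorem parity_flip (i : Int) : (PySem.Int.mod (i + 1) 2 == 1) = !(PySem.Int.mod i 2 == 1) := by
  have h1 := PySem.Int.floordiv_mul_add_mod i 2
  have h2 := PySem.Int.floordiv_mul_add_mod (i + 1) 2
  have b1 := PySem.Int.mod_nonneg i (b := 2) (by norm_num)
  have b2 := PySem.Int.mod_lt i (b := 2) (by norm_num)
  have b3 := PySem.Int.mod_nonneg (i + 1) (b := 2) (by norm_num)
  have b4 := PySem.Int.mod_lt (i + 1) (b := 2) (by norm_num)
  have : PySem.Int.mod (i + 1) 2 = 1 - PySem.Int.mod i 2 := by omega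
  rw [this]
  rcases PySem.Int.mod_two_eq i with h | h <;> rw [h] <;> decide

theorem enum_fold_zigzag (g : Int → List Int) (ys : List Int) :
    ∀ (i : Int) (acc : List (Int × Int)),
    (PySem.List.enumerate ys i).foldl (fun meandered iy =>
      (if PySem.Int.mod iy.1 2 == 1 then (g iy.2).reverse else (g iy.2)).foldl
        (fun acc x => acc ++ [(x, iy.2)]) meandered) acc
    = acc ++ zigzag (PySem.Int.mod i 2 == 1) (ys.map (fun y => (g y).map (fun x => (x, y)))) := by
  induction ys with
  | nil => intro i acc; simp [PySem.List.enumerate, zigzag]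
  | cons y ys ih =>
    intro i acc
    rw [show PySem.List.enumerate (y :: ys) i = (i, y) :: PySem.List.enumerate ys (i + 1) from rfl]
    rw [List.foldl_cons, ih (i + 1), parity_flip i]
    rcases Bool.eq_false_or_eq_true (PySem.Int.mod i 2 == 1) with h | h <;> rw [h] <;>
      simp only [List.map_cons, zigzag, Bool.not_true, Bool.not_false, Bool.false_eq_true,
        if_true, if_false, PySem.List.foldl_append_singleton_eq_map, List.map_reverse,
        List.append_assoc]

theorem rows_getD (tk : List (Int × Int)) (y : Int) :
    (tk.foldl (fun d p => d.modify p.2 ([] : List Int) (fun xs => xs ++ [p.1]))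
      PySem.Dict.empty).getD y []
    = (tk.filter (fun p => p.2 == y)).map (fun p => p.1) := by
  have hswap : tk.foldl (fun d p => d.modify p.2 ([] : List Int) (fun xs => xs ++ [p.1]))
      PySem.Dict.empty
      = (tk.map Prod.swap).foldl (fun d q => d.modify q.1 ([] : List Int) (fun xs => xs ++ [q.2]))
        PySem.Dict.empty := by
    rw [List.foldl_map]
    rfl
  rw [hswap, PySem.Dict.getD_foldl_modify_append, PySem.Dict.getD_empty, List.nil_append]
  rw [List.filter_map]
  rw [List.map_map]
  rfl

theorem rows_keys (tk : List (Int × Int)) :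
    (tk.foldl (fun d p => d.modify p.2 ([] : List Int) (fun xs => xs ++ [p.1]))
      PySem.Dict.empty).keys
    = PySem.Set.ofList (tk.map (fun p => p.2)) := by
  rw [PySem.Dict.keys_foldl_modify_key tk (fun p => p.2) ([] : List Int)
    (fun _ p xs => xs ++ [p.1]) PySem.Dict.empty]
  rfl

theorem a_eq_zigzag (tk : List (Int × Int)) :
    meander_order_py tk = zigzag false (blocksOf tk) := by
  simp only [meander_order_py, rows_getD, rows_keys]
  rw [enum_fold_zigzag
    (fun y => PySem.List.sorted ((tk.filter (fun p => p.2 == y)).map (fun p => p.1))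
      (fun x => x) false)
    (PySem.List.sorted (PySem.Set.ofList (tk.map (fun p => p.2))) (fun y => y) false) 0 []]
  rfl

-- ===== VERDICT (by name: the statement is the Claim_ definition above) =====
theorem meander_order_py_spec : Claim_equal_meander_order_py := by
  intro tk _
  unfold Spec_meander_order_py
  rw [a_eq_zigzag, alt_eq_zigzag]
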